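-- pv_equiv track=rewrite | github.com/Rupicola726/Davinci_Interview_Auto_Editor | SubtitleManager.py | id_generator
-- ===== SOURCE A (Python) =====
-- def id_generator(n, text, start_fc, end_fc):
--     tails = ''
--     for character in text:
--         if character.isalpha():
--             tails += character
--             break
--     for character in text[::-1]:
--         if character.isalpha():
--             tails += character
--             break
--     if tails == '':
--         tails = '~~'
--     id = tails + str(n + len(text)) + '-' + str(start_fc) + 'X' + str(end_fc)
--     return id
-- ===== SOURCE B (Python) =====
-- def id_generator(n, text, start_fc, end_fc):
--     alphas = [c for c in text if c.isalpha()]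
--     tails = alphas[0] + alphas[-1] if alphas else '~~'
--     return tails + str(n + len(text)) + '-' + str(start_fc) + 'X' + str(end_fc)
-- ===== Notes on version B (the rewrite author's own statement) =====
-- stated objective: simpler
-- what changed: Replaces the two directional scan loops (forward with break, and over the reversed string with break) by one filter pass collecting all alphabetic characters and taking its first and last elements, with a conditional expression instead of the empty-string sentinel rewrite.
import Mathlib
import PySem

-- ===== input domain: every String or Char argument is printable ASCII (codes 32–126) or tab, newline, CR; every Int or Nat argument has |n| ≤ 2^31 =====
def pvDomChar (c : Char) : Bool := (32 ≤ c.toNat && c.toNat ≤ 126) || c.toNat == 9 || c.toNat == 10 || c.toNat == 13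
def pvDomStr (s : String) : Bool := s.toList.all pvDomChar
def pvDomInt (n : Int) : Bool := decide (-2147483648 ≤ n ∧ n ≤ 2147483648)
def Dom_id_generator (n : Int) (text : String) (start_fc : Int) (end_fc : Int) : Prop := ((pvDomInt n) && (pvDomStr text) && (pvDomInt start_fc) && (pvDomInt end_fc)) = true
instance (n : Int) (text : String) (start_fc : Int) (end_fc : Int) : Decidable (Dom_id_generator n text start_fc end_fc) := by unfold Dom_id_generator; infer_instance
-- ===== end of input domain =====

-- B replaces A's two directional break-loops by one filter pass whose first/last elements give the tails (simpler decomposition; same behaviour).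


-- ===== PORT A =====
-- 'for character in cs: if character.isalpha(): tails += character; break' (Char.isAlpha is exact for str.isalpha on the ASCII domain)
def pvTailLoop (tails : List Char) (cs : List Char) : List Char :=
  match cs with
  | [] => tails
  | c :: rest => if c.isAlpha then tails ++ [c] else pvTailLoop tails rest

def id_generator (n : Int) (text : String) (start_fc : Int) (end_fc : Int) : String :=
  let tails0 : List Char := []
  let tails1 := pvTailLoop tails0 text.toList
  -- text[::-1] reverses the string
  let tails2 := pvTailLoop tails1 text.toList.reverse
  let tails := if tails2 = [] then ['~', '~'] else tails2
  String.mk (tails ++ PySem.Int.toChars (n + (text.toList.length : Int)) ++ ['-']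
      ++ PySem.Int.toChars start_fc ++ ['X'] ++ PySem.Int.toChars end_fc)

-- ===== PORT B =====
def id_generator_alt (n : Int) (text : String) (start_fc : Int) (end_fc : Int) : String :=
  let alphas := text.toList.filter Char.isAlpha
  let tails := if alphas = [] then ['~', '~'] else [alphas.head!, alphas.getLast!]
  String.mk (tails ++ PySem.Int.toChars (n + (text.toList.length : Int)) ++ ['-']
      ++ PySem.Int.toChars start_fc ++ ['X'] ++ PySem.Int.toChars end_fc)

-- ===== PRECONDITION & SPEC =====
def Spec_id_generator (n : Int) (text : String) (start_fc : Int) (end_fc : Int) (out : String) : Prop := out = id_generator_alt n text start_fc end_fc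
instance (n : Int) (text : String) (start_fc : Int) (end_fc : Int) (out : String) : Decidable (Spec_id_generator n text start_fc end_fc out) := by unfold Spec_id_generator; infer_instance

-- ===== CLAIM (what is proved, stated in full; the proofs are below) =====
def Claim_equal_id_generator : Prop := ∀ (n : Int) (text : String) (start_fc : Int) (end_fc : Int), Dom_id_generator n text start_fc end_fc → Spec_id_generator n text start_fc end_fc (id_generator n text start_fc end_fc)

-- ===== LEMMAS AND PROOFS =====
-- A's break-loop appends the first alphabetic character of cs, i.e. the head of the filtered list.
theorem pvTailLoop_eq (tails cs : List Char) :
    pvTailLoop tails cs = tails ++ (cs.filter Char.isAlpha).take 1 := by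
  induction cs with
  | nil => simp [pvTailLoop]
  | cons c rest ih =>
      by_cases h : c.isAlpha <;> simp [pvTailLoop, h, ih]

theorem pv_tails_eq (cs : List Char) :
    (cs.filter Char.isAlpha).take 1 ++ (cs.reverse.filter Char.isAlpha).take 1
      = (if cs.filter Char.isAlpha = [] then ([] : List Char)
         else [(cs.filter Char.isAlpha).head!, (cs.filter Char.isAlpha).getLast!]) := by
  rw [List.filter_reverse]
  cases hF : cs.filter Char.isAlpha with
  | nil => simp
  | cons c rest =>
      simp only [if_neg (by simp : (c :: rest : List Char) ≠ [])]
      induction rest using List.reverseRecOn with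
      | nil => simp
      | append_singleton ys y _ =>
          simp [show (c :: (ys ++ [y])).getLast? = some y from by rw [← List.cons_append]; exact List.getLast?_concat]

-- ===== VERDICT (by name: the statement is the Claim_ definition above) =====
theorem id_generator_spec : Claim_equal_id_generator := by
  intro n text start_fc end_fc _
  unfold Spec_id_generator id_generator id_generator_alt
  simp only [pvTailLoop_eq, List.nil_append]
  rw [pv_tails_eq]
  by_cases h : text.toList.filter Char.isAlpha = [] <;> simp [h]
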